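-- pv_equiv track=rewrite | github.com/reroze/data_analyse | APriori/Aprioriv3.py | list_true_sub
-- ===== SOURCE A (Python) =====
-- def list_true_sub(alist):
--     N = len(alist)
--     res = []
--     for i in range(2**N):
--         combo = []
--         for j in range(N):
--             if((i>>j)%2):
--                 combo.append(alist[j])
--         if len(combo)!=0 and len(combo)!=N:
--             res.append(combo)
--     return res
-- ===== SOURCE B (Python) =====
-- def list_true_sub(alist):
--     subsets = [[]]
--     for x in alist:
--         subsets = subsets + [s + [x] for s in subsets]
--     n = len(alist)
--     return [s for s in subsets if len(s) != 0 and len(s) != n]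
-- ===== Notes on version B (the rewrite author's own statement) =====
-- stated objective: alternative
-- what changed: Replaces the bitmask double loop (for each i in range(2**N) decode bits to a combo) with an incremental powerset doubling (subsets grows by appending x to every existing subset), then filters out the empty and full subsets.
import Mathlib
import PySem

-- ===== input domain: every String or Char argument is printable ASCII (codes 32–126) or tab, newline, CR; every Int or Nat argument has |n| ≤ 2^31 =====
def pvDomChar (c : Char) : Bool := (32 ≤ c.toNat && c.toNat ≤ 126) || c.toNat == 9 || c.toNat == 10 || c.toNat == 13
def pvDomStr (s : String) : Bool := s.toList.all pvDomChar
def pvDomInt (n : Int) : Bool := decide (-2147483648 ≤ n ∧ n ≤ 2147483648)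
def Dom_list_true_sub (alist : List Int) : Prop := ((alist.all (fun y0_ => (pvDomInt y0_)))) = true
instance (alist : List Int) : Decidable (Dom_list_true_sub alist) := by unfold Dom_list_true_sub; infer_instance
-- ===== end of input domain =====

-- B replaces A's bitmask enumeration with incremental powerset doubling (same output order);
-- objective: alternative (same asymptotic cost, no per-subset bit decoding).


-- ===== PORT A =====
-- Literal port: i ranges over range(2**N); bit j of i selects alist[j] (always in range, so getD).
def list_true_sub (alist : List Int) : List (List Int) :=
  let N := alist.length
  (List.range (2 ^ N)).foldl (fun res i =>
    let combo := (List.range N).foldl (fun combo j =>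
      if (i >>> j) % 2 != 0 then combo ++ [alist.getD j 0] else combo) []
    if combo.length != 0 && combo.length != N then res ++ [combo] else res) []

-- ===== PORT B =====
def list_true_sub_alt (alist : List Int) : List (List Int) :=
  let subsets := alist.foldl (fun ss x => ss ++ ss.map (fun s => s ++ [x])) [[]]
  subsets.filter (fun s => s.length != 0 && s.length != alist.length)

-- ===== PRECONDITION & SPEC =====
def Spec_list_true_sub (alist : List Int) (out : List (List Int)) : Prop := out = list_true_sub_alt alist
instance (alist : List Int) (out : List (List Int)) : Decidable (Spec_list_true_sub alist out) := by unfold Spec_list_true_sub; infer_instance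

-- ===== CLAIM (what is proved, stated in full; the proofs are below) =====
def Claim_equal_list_true_sub : Prop := ∀ (alist : List Int), Dom_list_true_sub alist → Spec_list_true_sub alist (list_true_sub alist)

-- ===== LEMMAS AND PROOFS =====

-- A's inner loop: the combo selected by the bits of i.
def comboA (l : List Int) (i : Nat) : List Int :=
  (List.range l.length).foldl (fun combo j =>
    if (i >>> j) % 2 != 0 then combo ++ [l.getD j 0] else combo) []

theorem foldl_congr' {α β : Type} (l : List α) (f g : β → α → β) (b : β)
    (h : ∀ x ∈ l, ∀ acc, f acc x = g acc x) : l.foldl f b = l.foldl g b := by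
  induction l generalizing b with
  | nil => rfl
  | cons a l ih =>
    simp only [List.foldl_cons]
    rw [h a (List.mem_cons_self ..)]
    exact ih _ (fun x hx acc => h x (List.mem_cons_of_mem _ hx) acc)

-- comboA only depends on bits j < l.length.
theorem comboA_congr (l : List Int) (i i' : Nat)
    (h : ∀ j < l.length, (i >>> j) % 2 = (i' >>> j) % 2) :
    comboA l i = comboA l i' := by
  unfold comboA
  apply foldl_congr'
  intro j hj acc
  rw [h j (List.mem_range.mp hj)]

theorem comboA_append (t : List Int) (x : Int) (i : Nat) :
    comboA (t ++ [x]) i =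
      if (i >>> t.length) % 2 != 0 then comboA t i ++ [x] else comboA t i := by
  unfold comboA
  have hlen : (t ++ [x]).length = t.length + 1 := by simp
  rw [hlen, List.range_succ, List.foldl_append, List.foldl_cons, List.foldl_nil]
  have hcong : (List.range t.length).foldl (fun combo j =>
      if (i >>> j) % 2 != 0 then combo ++ [(t ++ [x]).getD j 0] else combo) []
      = (List.range t.length).foldl (fun combo j =>
      if (i >>> j) % 2 != 0 then combo ++ [t.getD j 0] else combo) [] := by
    apply foldl_congr'
    intro j hj acc
    have hj' : j < t.length := List.mem_range.mp hj
    rw [List.getD_append _ _ _ _ hj']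
  have hget : (t ++ [x]).getD t.length 0 = x := by
    simp [List.getD]
  rw [hcong, hget]

-- bit arithmetic: adding 2^n does not change bits below n …
theorem bit_low (n j i : Nat) (hj : j < n) :
    ((2 ^ n + i) >>> j) % 2 = (i >>> j) % 2 := by
  simp only [Nat.shiftRight_eq_div_pow]
  have hd : 2 ^ n + i = i + 2 ^ (n - j) * 2 ^ j := by
    rw [← pow_add]
    have : n - j + j = n := by omega
    rw [this]; omega
  rw [hd, Nat.add_mul_div_right _ _ (Nat.pow_pos (by norm_num))]
  have h2 : 2 ^ (n - j) = 2 * 2 ^ (n - j - 1) := by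
    rw [← pow_succ']
    congr 1; omega
  omega

-- … and sets bit n when i < 2^n, while i < 2^n has bit n clear.
theorem bit_high (n i : Nat) (hi : i < 2 ^ n) :
    ((2 ^ n + i) >>> n) % 2 = 1 := by
  simp only [Nat.shiftRight_eq_div_pow]
  rw [Nat.add_comm, Nat.add_div_right _ (Nat.pow_pos (by norm_num)),
    Nat.div_eq_of_lt hi]

theorem bit_clear (n i : Nat) (hi : i < 2 ^ n) : (i >>> n) % 2 = 0 := by
  simp [Nat.shiftRight_eq_div_pow, Nat.div_eq_of_lt hi]

-- KEY: the bitmask-enumerated powerset equals the doubling powerset, in order.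
theorem powerset_eq (l : List Int) :
    (List.range (2 ^ l.length)).map (comboA l)
      = l.foldl (fun ss x => ss ++ ss.map (fun s => s ++ [x])) [[]] := by
  induction l using List.reverseRecOn with
  | nil => simp [comboA]
  | append_singleton t x ih =>
    have hlen : (t ++ [x]).length = t.length + 1 := by simp
    have hpow : 2 ^ (t.length + 1) = 2 ^ t.length + 2 ^ t.length := by
      rw [pow_succ]; omega
    rw [hlen, hpow, List.range_add, List.map_append, List.map_map,
      List.foldl_append, List.foldl_cons, List.foldl_nil, ← ih]
    congr 1
    · apply List.map_congr_left
      intro i hi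
      have hi' : i < 2 ^ t.length := List.mem_range.mp hi
      rw [comboA_append, bit_clear _ _ hi']
      simp
    · rw [List.map_map]
      apply List.map_congr_left
      intro i hi
      have hi' : i < 2 ^ t.length := List.mem_range.mp hi
      simp only [Function.comp]
      rw [comboA_append, bit_high _ _ hi']
      have : comboA t (2 ^ t.length + i) = comboA t i :=
        comboA_congr _ _ _ (fun j hj => bit_low _ _ _ hj)
      simp [this]

-- A's outer loop is 'map then filter'.
theorem foldl_if_append_map (f : Nat → List Int) (p : List Int → Bool)
    (xs : List Nat) (acc : List (List Int)) :
    xs.foldl (fun res i => if p (f i) then res ++ [f i] else res) acc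
      = acc ++ ((xs.map f).filter p) := by
  induction xs generalizing acc with
  | nil => simp
  | cons a xs ih =>
    simp only [List.foldl_cons, List.map_cons, List.filter_cons]
    rw [ih]
    split <;> simp

-- ===== VERDICT (by name: the statement is the Claim_ definition above) =====
theorem list_true_sub_spec : Claim_equal_list_true_sub := by
  intro alist _
  show list_true_sub alist = list_true_sub_alt alist
  have h := foldl_if_append_map (comboA alist)
    (fun s => s.length != 0 && s.length != alist.length) (List.range (2 ^ alist.length)) []
  rw [powerset_eq] at h
  exact h
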